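-- pv_equiv track=rewrite | github.com/18F/omb-eregs-prototypes | demo01/agencies.py | transform
-- ===== SOURCE A (Python) =====
-- aliases = {
--     'all cfo act agencies': 'cfo act agencies',
--     'all agencies': 'executive agencies',
--     'cfo act agencies [ref. req. 5.01]': 'cfo act agencies',
--     'all cfo-act agencies': 'cfo act agencies',
--     'agency cios': 'executive agencies',
--     'agencies': 'executive agencies',
--     'all cfo act agencies - cio': 'cfo act agencies',
--     'federal government': 'executive agencies',
--     'department of commerce': 'doc',
--     'sslc': 'cfo act agencies',
--     'department of homeland security': 'dhs',
--     'all cfo act agencies - cios': 'cfo act agencies',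
--     'gsa ogp': 'gsa',
--     'all government offices': 'executive agencies',
--     'general services administration': 'gsa',
--     'federal chief information officers council (federal cio council)':
--         'federal cio council',
--     'national archives': 'nara',
--     'office of personnel management': 'opm',
-- }
--
-- misparse = [
--     'development expenditures', 'records administration', 'congress',
-- ]
--
-- def transform(text):
--     row_agencies = [
--         a.strip().lower()
--         for a_semi in text.split(';')
--         for a_comma in a_semi.split(',')
--         for a in a_comma.split(' and ')
--         if a.strip() and a != 'NA'
--     ]
--     row_agencies = [aliases.get(name, name) for name in row_agencies]
--     row_agencies = [name for name in row_agencies if name not in misparse]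
--     return row_agencies
-- ===== SOURCE B (Python) =====
-- aliases = {
--     'all cfo act agencies': 'cfo act agencies',
--     'all agencies': 'executive agencies',
--     'cfo act agencies [ref. req. 5.01]': 'cfo act agencies',
--     'all cfo-act agencies': 'cfo act agencies',
--     'agency cios': 'executive agencies',
--     'agencies': 'executive agencies',
--     'all cfo act agencies - cio': 'cfo act agencies',
--     'federal government': 'executive agencies',
--     'department of commerce': 'doc',
--     'sslc': 'cfo act agencies',
--     'department of homeland security': 'dhs',
--     'all cfo act agencies - cios': 'cfo act agencies',
--     'gsa ogp': 'gsa',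
--     'all government offices': 'executive agencies',
--     'general services administration': 'gsa',
--     'federal chief information officers council (federal cio council)':
--         'federal cio council',
--     'national archives': 'nara',
--     'office of personnel management': 'opm',
-- }
--
-- misparse = [
--     'development expenditures', 'records administration', 'congress',
-- ]
--
--
-- def transform(text):
--     # One char-level scan tokenizes on all three delimiters at once,
--     # then one fused pass filters, normalizes, aliases and drops misparses.
--     toks, cur, i, n = [], [], 0, len(text)
--     while i < n:
--         c = text[i]
--         if c == ';' or c == ',':
--             toks.append(''.join(cur))
--             cur = []
--             i += 1
--         elif text.startswith(' and ', i):
--             toks.append(''.join(cur))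
--             cur = []
--             i += 5
--         else:
--             cur.append(c)
--             i += 1
--     toks.append(''.join(cur))
--
--     out = []
--     for a in toks:
--         if a.strip() and a != 'NA':
--             stripped = a.strip().lower()
--             name = aliases.get(stripped, stripped)
--             if name not in misparse:
--                 out.append(name)
--     return out
-- ===== Notes on version B (the rewrite author's own statement) =====
-- stated objective: alternative
-- what changed: B replaces A's three nested str.split passes plus three separate list passes (comprehension, alias map, misparse filter) by a single character-level scan that tokenizes on ';', ',' and ' and ' at once, followed by one fused loop that filters, strips/lowers, aliases and drops misparses per token.
import Mathlib
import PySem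

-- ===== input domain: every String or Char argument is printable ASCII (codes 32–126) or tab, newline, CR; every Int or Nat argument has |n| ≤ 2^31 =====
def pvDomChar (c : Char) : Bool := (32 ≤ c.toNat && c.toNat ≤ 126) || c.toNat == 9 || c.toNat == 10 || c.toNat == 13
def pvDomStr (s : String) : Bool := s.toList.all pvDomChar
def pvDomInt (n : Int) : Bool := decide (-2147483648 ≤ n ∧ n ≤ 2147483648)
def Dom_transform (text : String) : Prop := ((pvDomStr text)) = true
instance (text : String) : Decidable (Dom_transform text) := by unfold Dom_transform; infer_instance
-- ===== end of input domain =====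

-- B replaces A's three nested split passes + three list passes by one char-level
-- tokenizing scan over the text and one fused filter/normalize/alias/drop loop (objective: alternative).

-- module-level constants shared by both Pythons
def pvAliases : PySem.Dict String String := PySem.Dict.ofList [
  ("all cfo act agencies", "cfo act agencies"),
  ("all agencies", "executive agencies"),
  ("cfo act agencies [ref. req. 5.01]", "cfo act agencies"),
  ("all cfo-act agencies", "cfo act agencies"),
  ("agency cios", "executive agencies"),
  ("agencies", "executive agencies"),
  ("all cfo act agencies - cio", "cfo act agencies"),
  ("federal government", "executive agencies"),
  ("department of commerce", "doc"),
  ("sslc", "cfo act agencies"),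
  ("department of homeland security", "dhs"),
  ("all cfo act agencies - cios", "cfo act agencies"),
  ("gsa ogp", "gsa"),
  ("all government offices", "executive agencies"),
  ("general services administration", "gsa"),
  ("federal chief information officers council (federal cio council)", "federal cio council"),
  ("national archives", "nara"),
  ("office of personnel management", "opm")]

def pvMisparse : List String := ["development expenditures", "records administration", "congress"]

-- ===== PORT A =====
def transform (text : String) : List String :=
  let row1 := ((PySem.Chars.splitOn text.toList [';']).flatMap (fun aSemi =>
      (PySem.Chars.splitOn aSemi [',']).flatMap (fun aComma =>
        PySem.Chars.splitOn aComma [' ', 'a', 'n', 'd', ' ']))).filterMap (fun a =>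
      if PySem.Chars.strip a ≠ [] ∧ a ≠ ['N', 'A'] then
        some (String.ofList (PySem.Chars.lower (PySem.Chars.strip a))) else none)
  let row2 := row1.map (fun name => PySem.Dict.getD pvAliases name name)
  row2.filter (fun name => !(pvMisparse.contains name))

-- ===== PORT B =====
-- the single tokenizing scan of Source B (the 'while i < n' loop): splits at ';', ',' or ' and '
def pvTokens : List Char → List Char → List (List Char)
  | [], cur => [cur]
  | ';' :: r, cur => cur :: pvTokens r []
  | ',' :: r, cur => cur :: pvTokens r []
  | ' ' :: 'a' :: 'n' :: 'd' :: ' ' :: r, cur => cur :: pvTokens r []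
  | c :: r, cur => pvTokens r (cur ++ [c])

def transform_alt (text : String) : List String :=
  (pvTokens text.toList []).foldl (fun out a =>
    if PySem.Chars.strip a ≠ [] ∧ a ≠ ['N', 'A'] then
      let stripped := String.ofList (PySem.Chars.lower (PySem.Chars.strip a))
      let name := PySem.Dict.getD pvAliases stripped stripped
      if !(pvMisparse.contains name) then out ++ [name] else out
    else out) []

-- ===== PRECONDITION & SPEC =====
def Spec_transform (text : String) (out : List String) : Prop := out = transform_alt text
instance (text : String) (out : List String) : Decidable (Spec_transform text out) := by unfold Spec_transform; infer_instance

-- ===== CLAIM (what is proved, stated in full; the proofs are below) =====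
def Claim_equal_transform : Prop := ∀ (text : String), Dom_transform text → Spec_transform text (transform text)

-- ===== LEMMAS AND PROOFS =====

-- head-extension of the first fragment
def pvConsHead (p : List Char) : List (List Char) → List (List Char)
  | [] => [p]
  | h :: t => (p ++ h) :: t

-- reference (fuel-free) characterisation of str.split(sep) for nonempty sep
def pvSplit (sep : List Char) : List Char → List (List Char)
  | [] => [[]]
  | c :: r =>
    if sep.isPrefixOf (c :: r) then [] :: pvSplit sep (r.drop (sep.length - 1))
    else pvConsHead [c] (pvSplit sep r)
  termination_by l => l.length
  decreasing_by all_goals simp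

theorem pvConsHead_consHead (a b : List Char) (X : List (List Char)) :
    pvConsHead a (pvConsHead b X) = pvConsHead (a ++ b) X := by
  cases X <;> simp [pvConsHead]

theorem pvSplit_nil (sep : List Char) : pvSplit sep [] = [[]] := by
  rw [pvSplit.eq_def]

theorem pvSplit_cons_pre (sep : List Char) (c : Char) (r : List Char)
    (h : sep.isPrefixOf (c :: r) = true) :
    pvSplit sep (c :: r) = [] :: pvSplit sep (r.drop (sep.length - 1)) := by
  rw [pvSplit.eq_def]; simp [h]

theorem pvSplit_cons_ne (sep : List Char) (c : Char) (r : List Char)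
    (h : ¬ sep.isPrefixOf (c :: r) = true) :
    pvSplit sep (c :: r) = pvConsHead [c] (pvSplit sep r) := by
  rw [pvSplit.eq_def]; simp [h]

theorem pvSplit_shape_aux (sep : List Char) :
    ∀ (n : Nat) (l : List Char), l.length ≤ n → ∃ h t, pvSplit sep l = h :: t ∧ h <+: l := by
  intro n
  induction n with
  | zero =>
    intro l hl
    have : l = [] := by cases l <;> simp_all
    subst this
    exact ⟨[], [], pvSplit_nil sep, List.nil_prefix⟩
  | succ n ih =>
    intro l hl
    cases l with
    | nil => exact ⟨[], [], pvSplit_nil sep, List.nil_prefix⟩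
    | cons c r =>
      by_cases hpre : sep.isPrefixOf (c :: r) = true
      · exact ⟨[], pvSplit sep (r.drop (sep.length - 1)), pvSplit_cons_pre sep c r hpre,
          List.nil_prefix⟩
      · obtain ⟨h, t, heq, hp⟩ := ih r (by simp at hl; omega)
        refine ⟨c :: h, t, ?_, List.cons_prefix_cons.mpr ⟨rfl, hp⟩⟩
        rw [pvSplit_cons_ne sep c r hpre, heq]
        simp [pvConsHead]

theorem pvSplit_shape (sep l : List Char) : ∃ h t, pvSplit sep l = h :: t ∧ h <+: l :=
  pvSplit_shape_aux sep l.length l le_rfl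

theorem pvConsHead_nil_of_ne (X : List (List Char)) (h : X ≠ []) : pvConsHead [] X = X := by
  cases X with
  | nil => exact absurd rfl h
  | cons x xs => simp [pvConsHead]

theorem pvGo_eq (sep : List Char) (hs : sep ≠ []) :
    ∀ fuel l cur acc, l.length < fuel →
      PySem.Chars.splitOn.go sep fuel l cur acc = acc.reverse ++ pvConsHead cur.reverse (pvSplit sep l) := by
  intro fuel
  induction fuel with
  | zero => intro l cur acc h; omega
  | succ fuel ih =>
    intro l cur acc h
    cases l with
    | nil =>
      rw [PySem.Chars.splitOn.go.eq_2 sep (fuel + 1) cur acc (by omega), pvSplit_nil]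
      simp [pvConsHead]
    | cons c r =>
      rw [PySem.Chars.splitOn.go.eq_3]
      by_cases hpre : sep.isPrefixOf (c :: r) = true
      · simp only [hpre, if_true]
        have hlen : 1 ≤ sep.length := by
          cases sep with
          | nil => exact absurd rfl hs
          | cons s ss => simp
        have hdrop : List.drop sep.length (c :: r) = r.drop (sep.length - 1) := by
          cases sep with
          | nil => exact absurd rfl hs
          | cons s ss => simp
        have hfl : (r.drop (sep.length - 1)).length < fuel := by
          simp at h ⊢
          omega
        rw [hdrop, ih _ _ _ hfl]
        obtain ⟨h1, t1, heq, _⟩ := pvSplit_shape sep (r.drop (sep.length - 1))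
        rw [pvSplit_cons_pre sep c r hpre, heq]
        simp [pvConsHead]
      · have hfl : r.length < fuel := by simp at h; omega
        rw [ih _ _ _ hfl, pvSplit_cons_ne sep c r hpre]
        simp [hpre, pvConsHead_consHead]

theorem pvSplitOn_eq (sep : List Char) (hs : sep ≠ []) (l : List Char) :
    PySem.Chars.splitOn l sep = pvSplit sep l := by
  rw [PySem.Chars.splitOn, pvGo_eq sep hs _ _ _ _ (by omega)]
  obtain ⟨h, t, heq, _⟩ := pvSplit_shape sep l
  simp [heq, pvConsHead]

-- the flattened fragment list A computes
def pvNested (l : List Char) : List (List Char) :=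
  (pvSplit [';'] l).flatMap (fun aSemi =>
    (pvSplit [','] aSemi).flatMap (fun aComma =>
      pvSplit [' ', 'a', 'n', 'd', ' '] aComma))

theorem pvSplit_single_append (d : Char) (p r : List Char) (hp : ∀ c ∈ p, c ≠ d) :
    pvSplit [d] (p ++ r) = pvConsHead p (pvSplit [d] r) := by
  induction p with
  | nil =>
    obtain ⟨h, t, heq, -⟩ := pvSplit_shape [d] r
    simp [heq, pvConsHead]
  | cons c p ih =>
    have hc : c ≠ d := hp c (by simp)
    have hpre : ¬ ([d].isPrefixOf (c :: (p ++ r)) = true) := by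
      simp [List.isPrefixOf, Ne.symm hc]
    rw [List.cons_append, pvSplit_cons_ne [d] c (p ++ r) hpre,
      ih (fun x hx => hp x (by simp [hx])), pvConsHead_consHead]
    simp

theorem pvNested_nil : pvNested [] = [[]] := by
  simp [pvNested, pvSplit_nil]

theorem pvNested_semi (r : List Char) : pvNested (';' :: r) = [] :: pvNested r := by
  unfold pvNested
  rw [pvSplit_cons_pre [';'] ';' r (by simp [List.isPrefixOf])]
  simp [pvSplit_nil]

theorem pvNested_comma (r : List Char) : pvNested (',' :: r) = [] :: pvNested r := by
  unfold pvNested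
  obtain ⟨h, t, heq, -⟩ := pvSplit_shape [';'] r
  rw [pvSplit_cons_ne [';'] ',' r (by simp [List.isPrefixOf]), heq]
  simp only [pvConsHead, List.singleton_append, List.flatMap_cons]
  rw [pvSplit_cons_pre [','] ',' h (by simp [List.isPrefixOf])]
  simp [pvSplit_nil]

set_option maxRecDepth 4096 in
theorem pvNested_and (r : List Char) :
    pvNested (' ' :: 'a' :: 'n' :: 'd' :: ' ' :: r) = [] :: pvNested r := by
  unfold pvNested
  obtain ⟨h, t, heq, -⟩ := pvSplit_shape [';'] r
  obtain ⟨h2, t2, heq2, -⟩ := pvSplit_shape [','] h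
  have e1 : pvSplit [';'] ([' ', 'a', 'n', 'd', ' '] ++ r)
      = pvConsHead [' ', 'a', 'n', 'd', ' '] (pvSplit [';'] r) :=
    pvSplit_single_append ';' [' ', 'a', 'n', 'd', ' '] r (by
      intro x hx
      simp at hx
      rcases hx with rfl | rfl | rfl | rfl | rfl <;> decide)
  have e2 : pvSplit [','] ([' ', 'a', 'n', 'd', ' '] ++ h)
      = pvConsHead [' ', 'a', 'n', 'd', ' '] (pvSplit [','] h) :=
    pvSplit_single_append ',' [' ', 'a', 'n', 'd', ' '] h (by
      intro x hx
      simp at hx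
      rcases hx with rfl | rfl | rfl | rfl | rfl <;> decide)
  have e3 : pvSplit [' ', 'a', 'n', 'd', ' '] ([' ', 'a', 'n', 'd', ' '] ++ h2)
      = [] :: pvSplit [' ', 'a', 'n', 'd', ' '] h2 := by
    rw [show ([' ', 'a', 'n', 'd', ' '] ++ h2) = ' ' :: ('a' :: 'n' :: 'd' :: ' ' :: h2) from rfl,
      pvSplit_cons_pre _ _ _ (by
        rw [List.isPrefixOf_iff_prefix]
        exact ⟨h2, rfl⟩)]
    simp
  rw [show (' ' :: 'a' :: 'n' :: 'd' :: ' ' :: r) = [' ', 'a', 'n', 'd', ' '] ++ r from rfl,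
    e1, heq]
  simp only [pvConsHead, List.flatMap_cons]
  rw [e2, heq2]
  simp only [pvConsHead, List.flatMap_cons]
  rw [e3]
  simp [List.append_assoc]

theorem pvNested_cons (c : Char) (r : List Char) (h1 : c ≠ ';') (h2 : c ≠ ',')
    (h3 : ¬ ([' ', 'a', 'n', 'd', ' '].isPrefixOf (c :: r) = true)) :
    pvNested (c :: r) = pvConsHead [c] (pvNested r) := by
  unfold pvNested
  obtain ⟨h, t, heq, hpr⟩ := pvSplit_shape [';'] r
  obtain ⟨h2', t2, heq2, hpr2⟩ := pvSplit_shape [','] h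
  obtain ⟨h3', t3, heq3, -⟩ := pvSplit_shape [' ', 'a', 'n', 'd', ' '] h2'
  have hc1 : ¬ ([';'].isPrefixOf (c :: r) = true) := by
    simp [List.isPrefixOf, Ne.symm h1]
  have hc2 : ¬ ([','].isPrefixOf (c :: h) = true) := by
    simp [List.isPrefixOf, Ne.symm h2]
  have hc3 : ¬ ([' ', 'a', 'n', 'd', ' '].isPrefixOf (c :: h2') = true) := by
    intro hpx
    apply h3
    rw [List.isPrefixOf_iff_prefix] at hpx ⊢
    exact hpx.trans (List.cons_prefix_cons.mpr ⟨rfl, hpr2.trans hpr⟩)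
  rw [pvSplit_cons_ne [';'] c r hc1, heq]
  simp only [pvConsHead, List.singleton_append, List.flatMap_cons]
  rw [pvSplit_cons_ne [','] c h hc2, heq2]
  simp only [pvConsHead, List.singleton_append, List.flatMap_cons]
  rw [pvSplit_cons_ne [' ', 'a', 'n', 'd', ' '] c h2' hc3, heq3]
  simp [pvConsHead, List.append_assoc]

theorem pvNested_shape (l : List Char) : ∃ x xs, pvNested l = x :: xs := by
  unfold pvNested
  obtain ⟨h, t, heq, -⟩ := pvSplit_shape [';'] l
  obtain ⟨h2, t2, heq2, -⟩ := pvSplit_shape [','] h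
  obtain ⟨h3, t3, heq3, -⟩ := pvSplit_shape [' ', 'a', 'n', 'd', ' '] h2
  rw [heq]
  simp only [List.flatMap_cons]
  rw [heq2]
  simp only [List.flatMap_cons]
  rw [heq3]
  simp only [List.cons_append]
  exact ⟨_, _, rfl⟩

theorem pvNested_ne_nil (l : List Char) : pvNested l ≠ [] := by
  obtain ⟨x, xs, heq⟩ := pvNested_shape l
  simp [heq]

theorem pvTokens_eq (l cur : List Char) : pvTokens l cur = pvConsHead cur (pvNested l) := by
  induction l, cur using pvTokens.induct with
  | case1 cur => rw [pvTokens.eq_1]; simp [pvNested_nil, pvConsHead]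
  | case2 r cur ih =>
    rw [pvTokens.eq_2, ih, pvConsHead_nil_of_ne _ (pvNested_ne_nil r), pvNested_semi]
    obtain ⟨x, xs, heq⟩ := pvNested_shape r
    simp [heq, pvConsHead]
  | case3 r cur ih =>
    rw [pvTokens.eq_3, ih, pvConsHead_nil_of_ne _ (pvNested_ne_nil r), pvNested_comma]
    obtain ⟨x, xs, heq⟩ := pvNested_shape r
    simp [heq, pvConsHead]
  | case4 r cur ih =>
    rw [pvTokens.eq_4, ih, pvConsHead_nil_of_ne _ (pvNested_ne_nil r), pvNested_and]
    obtain ⟨x, xs, heq⟩ := pvNested_shape r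
    simp [heq, pvConsHead]
  | case5 c r cur hn1 hn2 hn3 ih =>
    have h1 : c ≠ ';' := fun hc => hn1 hc
    have h2 : c ≠ ',' := fun hc => hn2 hc
    have h3 : ¬ ([' ', 'a', 'n', 'd', ' '].isPrefixOf (c :: r) = true) := by
      intro hpx
      rw [List.isPrefixOf_iff_prefix] at hpx
      obtain ⟨s, hs⟩ := hpx
      simp only [List.cons_append, List.cons.injEq] at hs
      exact hn3 ([] ++ s) hs.1.symm hs.2.symm
    rw [pvTokens.eq_5 cur c r hn1 hn2 hn3, ih, pvNested_cons c r h1 h2 h3,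
      pvConsHead_consHead]

theorem pvFold_fusion (p : List Char → Prop) [DecidablePred p]
    (f : List Char → String) (g : String → String) (q : String → Bool)
    (fs : List (List Char)) : ∀ acc : List String,
    fs.foldl (fun out a =>
      if p a then
        let stripped := f a
        let name := g stripped
        if q name then out ++ [name] else out
      else out) acc
    = acc ++ (((fs.filterMap (fun a => if p a then some (f a) else none)).map g).filter q) := by
  induction fs with
  | nil => intro acc; simp
  | cons a fs ih =>
    intro acc
    simp only [List.foldl_cons, List.filterMap_cons]
    by_cases hp : p a
    · rw [if_pos hp, if_pos hp]
      cases hq : q (g (f a)) with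
      | true => simp [hq, ih]
      | false => simp [hq, ih]
    · rw [if_neg hp, if_neg hp]
      simp [ih]

-- ===== VERDICT (by name: the statement is the Claim_ definition above) =====
theorem transform_spec : Claim_equal_transform := by
  intro text _
  unfold Spec_transform transform transform_alt
  rw [pvTokens_eq text.toList [], pvConsHead_nil_of_ne _ (pvNested_ne_nil _),
    pvFold_fusion (fun a => PySem.Chars.strip a ≠ [] ∧ a ≠ ['N', 'A'])
      (fun a => String.ofList (PySem.Chars.lower (PySem.Chars.strip a)))
      (fun name => PySem.Dict.getD pvAliases name name)
      (fun name => !(pvMisparse.contains name))]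
  simp only [pvSplitOn_eq [';'] (by simp), pvSplitOn_eq [','] (by simp),
    pvSplitOn_eq [' ', 'a', 'n', 'd', ' '] (by simp), pvNested, List.nil_append]
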